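-- pv_equiv track=rewrite | github.com/penguintechinc/ArticDBM | manager/app.py | get_next_instance_class
-- ===== SOURCE A (Python) =====
-- def get_next_instance_class(current_class, direction):
--     """Get the next instance class for scaling up or down"""
--     aws_classes = ['db.t3.micro', 'db.t3.small', 'db.t3.medium', 'db.t3.large', 'db.t3.xlarge', 'db.t3.2xlarge']
--     gcp_classes = ['db-f1-micro', 'db-g1-small', 'db-n1-standard-1', 'db-n1-standard-2', 'db-n1-standard-4', 'db-n1-standard-8']
--     k8s_classes = ['small', 'medium', 'large', 'xlarge', '2xlarge']
--
--     for class_list in [aws_classes, gcp_classes, k8s_classes]: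
--         if current_class in class_list:
--             current_index = class_list.index(current_class)
--
--             if direction == 'up' and current_index < len(class_list) - 1:
--                 return class_list[current_index + 1]
--             elif direction == 'down' and current_index > 0:
--                 return class_list[current_index - 1]
--
--     return current_class
-- ===== SOURCE B (Python) =====
-- _CLASS_LISTS = [
--     ['db.t3.micro', 'db.t3.small', 'db.t3.medium', 'db.t3.large', 'db.t3.xlarge', 'db.t3.2xlarge'],
--     ['db-f1-micro', 'db-g1-small', 'db-n1-standard-1', 'db-n1-standard-2', 'db-n1-standard-4', 'db-n1-standard-8'],
--     ['small', 'medium', 'large', 'xlarge', '2xlarge'],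
-- ]
--
-- def _build_table():
--     table = {}
--     for lst in _CLASS_LISTS:
--         for a, b in zip(lst, lst[1:]):
--             table[(a, 'up')] = b
--             table[(b, 'down')] = a
--     return table
--
-- _TABLE = _build_table()
--
-- def get_next_instance_class(current_class, direction):
--     """Get the next instance class for scaling up or down"""
--     return _TABLE.get((current_class, direction), current_class)
-- ===== Notes on version B (the rewrite author's own statement) =====
-- stated objective: simpler
-- what changed: Replaces the runtime scan over the three lists (membership test, .index call, up/down branch logic) with a precomputed adjacency table mapping (class, direction) to its neighbour; the body is a single dict .get with the input as default, boundary and unknown inputs having no key.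
import Mathlib
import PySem

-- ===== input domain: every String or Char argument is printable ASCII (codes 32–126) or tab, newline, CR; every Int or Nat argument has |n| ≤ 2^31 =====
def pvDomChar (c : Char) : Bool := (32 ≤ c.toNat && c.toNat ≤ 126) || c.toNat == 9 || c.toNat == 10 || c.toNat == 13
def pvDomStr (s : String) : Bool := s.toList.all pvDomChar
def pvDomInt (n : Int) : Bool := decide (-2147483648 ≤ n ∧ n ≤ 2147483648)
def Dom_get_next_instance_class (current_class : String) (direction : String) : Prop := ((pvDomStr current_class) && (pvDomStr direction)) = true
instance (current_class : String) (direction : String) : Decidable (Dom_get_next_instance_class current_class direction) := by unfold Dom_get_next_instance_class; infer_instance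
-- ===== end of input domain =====

-- B replaces A's runtime scan over the three lists (membership, .index, up/down branches)
-- by a precomputed (class, direction) → neighbour adjacency table with a defaulting lookup; objective: simpler.

-- ===== PORT A =====
def pvAwsClasses : List String :=
  ["db.t3.micro", "db.t3.small", "db.t3.medium", "db.t3.large", "db.t3.xlarge", "db.t3.2xlarge"]
def pvGcpClasses : List String :=
  ["db-f1-micro", "db-g1-small", "db-n1-standard-1", "db-n1-standard-2", "db-n1-standard-4", "db-n1-standard-8"]
def pvK8sClasses : List String := ["small", "medium", "large", "xlarge", "2xlarge"]

-- the for-loop over [aws_classes, gcp_classes, k8s_classes]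
def pvLoopA (current_class direction : String) : List (List String) → String
  | [] => current_class
  | cl :: rest =>
    if current_class ∈ cl then
      match PySem.List.index? cl current_class with
      | some i =>
        if direction = "up" ∧ (i : Int) < (cl.length : Int) - 1 then
          (PySem.List.pyGet? cl ((i : Int) + 1)).getD current_class
        else if direction = "down" ∧ (i : Int) > 0 then
          (PySem.List.pyGet? cl ((i : Int) - 1)).getD current_class
        else pvLoopA current_class direction rest
      | none => current_class  -- unreachable: membership was just checked
    else pvLoopA current_class direction rest

def get_next_instance_class (current_class : String) (direction : String) : String :=
  pvLoopA current_class direction [pvAwsClasses, pvGcpClasses, pvK8sClasses]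

-- ===== PORT B =====
def pvClassLists : List (List String) := [pvAwsClasses, pvGcpClasses, pvK8sClasses]

-- _build_table(): for each list, for each adjacent pair (a, b): (a,'up') ↦ b and (b,'down') ↦ a
def pvTable : PySem.Dict (String × String) String :=
  pvClassLists.foldl
    (fun table lst =>
      (lst.zip (PySem.List.slice lst (some 1) none)).foldl
        (fun t ab => (t.insert (ab.1, "up") ab.2).insert ((ab.2, "down")) ab.1)
        table)
    PySem.Dict.empty

def get_next_instance_class_alt (current_class : String) (direction : String) : String :=
  (pvTable.get? (current_class, direction)).getD current_class

-- ===== PRECONDITION & SPEC =====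
def Spec_get_next_instance_class (current_class : String) (direction : String) (out : String) : Prop := out = get_next_instance_class_alt current_class direction
instance (current_class : String) (direction : String) (out : String) : Decidable (Spec_get_next_instance_class current_class direction out) := by unfold Spec_get_next_instance_class; infer_instance

-- ===== CLAIM (what is proved, stated in full; the proofs are below) =====
def Claim_equal_get_next_instance_class : Prop := ∀ (current_class : String) (direction : String), Dom_get_next_instance_class current_class direction → Spec_get_next_instance_class current_class direction (get_next_instance_class current_class direction)

-- ===== LEMMAS AND PROOFS =====

-- table literal used only by the proofs
def pvTableLit : PySem.Dict (String × String) String := PySem.Dict.mk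
  [(("db.t3.micro", "up"), "db.t3.small"), (("db.t3.small", "down"), "db.t3.micro"),
   (("db.t3.small", "up"), "db.t3.medium"), (("db.t3.medium", "down"), "db.t3.small"),
   (("db.t3.medium", "up"), "db.t3.large"), (("db.t3.large", "down"), "db.t3.medium"),
   (("db.t3.large", "up"), "db.t3.xlarge"), (("db.t3.xlarge", "down"), "db.t3.large"),
   (("db.t3.xlarge", "up"), "db.t3.2xlarge"), (("db.t3.2xlarge", "down"), "db.t3.xlarge"),
   (("db-f1-micro", "up"), "db-g1-small"), (("db-g1-small", "down"), "db-f1-micro"),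
   (("db-g1-small", "up"), "db-n1-standard-1"), (("db-n1-standard-1", "down"), "db-g1-small"),
   (("db-n1-standard-1", "up"), "db-n1-standard-2"), (("db-n1-standard-2", "down"), "db-n1-standard-1"),
   (("db-n1-standard-2", "up"), "db-n1-standard-4"), (("db-n1-standard-4", "down"), "db-n1-standard-2"),
   (("db-n1-standard-4", "up"), "db-n1-standard-8"), (("db-n1-standard-8", "down"), "db-n1-standard-4"),
   (("small", "up"), "medium"), (("medium", "down"), "small"), (("medium", "up"), "large"),
   (("large", "down"), "medium"), (("large", "up"), "xlarge"), (("xlarge", "down"), "large"),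
   (("xlarge", "up"), "2xlarge"), (("2xlarge", "down"), "xlarge")]

theorem pvTable_eq : pvTable = pvTableLit := by decide

-- A = B when current_class is a known class name but direction is neither 'up' nor 'down'
theorem pv_known_other_dir (cc dir : String)
    (hm : cc ∈ (pvAwsClasses ++ pvGcpClasses ++ pvK8sClasses))
    (hu : dir ≠ "up") (hd : dir ≠ "down") :
    get_next_instance_class cc dir = get_next_instance_class_alt cc dir := by
  fin_cases hm <;>
    simp [get_next_instance_class, get_next_instance_class_alt, pvLoopA,
      pvAwsClasses, pvGcpClasses, pvK8sClasses, pvTable_eq, pvTableLit,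
      Prod.mk.injEq, hu, hd, Ne.symm hu, Ne.symm hd,
      List.idxOf?, List.findIdx?, List.findIdx?.go, PySem.Dict.get?]

-- A = B when current_class is not one of the class names
theorem pv_unknown (cc dir : String)
    (h : cc ∉ (pvAwsClasses ++ pvGcpClasses ++ pvK8sClasses)) :
    get_next_instance_class cc dir = get_next_instance_class_alt cc dir := by
  simp only [pvAwsClasses, pvGcpClasses, pvK8sClasses, List.cons_append,
    List.nil_append, List.mem_cons, not_or] at h
  obtain ⟨n1,n2,n3,n4,n5,n6,n7,n8,n9,n10,n11,n12,n13,n14,n15,n16,n17,-⟩ := h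
  simp [get_next_instance_class, get_next_instance_class_alt, pvLoopA,
    pvAwsClasses, pvGcpClasses, pvK8sClasses, pvTable_eq, pvTableLit,
    Prod.mk.injEq, PySem.Dict.get?,
    n1,n2,n3,n4,n5,n6,n7,n8,n9,n10,n11,n12,n13,n14,n15,n16,n17,
    Ne.symm n1,Ne.symm n2,Ne.symm n3,Ne.symm n4,Ne.symm n5,Ne.symm n6,Ne.symm n7,Ne.symm n8,
    Ne.symm n9,Ne.symm n10,Ne.symm n11,Ne.symm n12,Ne.symm n13,Ne.symm n14,Ne.symm n15,
    Ne.symm n16,Ne.symm n17]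

-- ===== VERDICT (by name: the statement is the Claim_ definition above) =====
theorem get_next_instance_class_spec : Claim_equal_get_next_instance_class := by
  intro cc dir _
  unfold Spec_get_next_instance_class
  by_cases h : cc ∈ (pvAwsClasses ++ pvGcpClasses ++ pvK8sClasses)
  · by_cases hu : dir = "up"
    · subst hu; fin_cases h <;> decide
    · by_cases hd : dir = "down"
      · subst hd; fin_cases h <;> decide
      · exact pv_known_other_dir cc dir h hu hd
  · exact pv_unknown cc dir h
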